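-- pv_equiv track=rewrite | github.com/yumion/cataractsWorkflow | src/evaluation.py | fix_outliers
-- ===== SOURCE A (Python) =====
-- def fix_outliers(truth_data_steps, prediction_data_steps):
--
--     steps_order = [truth_data_steps[0]]
--     for step_index in range(len(truth_data_steps)):
--         if step_index != 0 and truth_data_steps[step_index] != truth_data_steps[step_index - 1]:
--             steps_order.append(truth_data_steps[step_index])
--
--     k = 0
--     for i in range(len(truth_data_steps)):
--
--         if i != 0 and truth_data_steps[i] != truth_data_steps[i - 1]:
--             k = k + 1
--
--         if truth_data_steps[i] == 0:  # check for idle step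
--             if truth_data_steps[i] != prediction_data_steps[i]:
--                 list_values_to_check = [steps_order[k], steps_order[k + 1]] if k == 0 else ([steps_order[k - 1],
--                                                                                              steps_order[k]] if k == len(steps_order) - 1 else
--                                                                                             [steps_order[k - 1],
--                                                                                              steps_order[k],
--                                                                                              steps_order[k + 1]])
--                 if prediction_data_steps[i] in list_values_to_check:
--                     prediction_data_steps[i] = truth_data_steps[i]
--
--     return truth_data_steps, prediction_data_steps
-- ===== SOURCE B (Python) =====
-- def _last_change(seq):
--     # out[j] = value of the run immediately preceding j's run in seq, or None for the first run
--     out = []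
--     cur = None
--     for j in range(len(seq)):
--         if j > 0 and seq[j - 1] != seq[j]:
--             cur = seq[j - 1]
--         out.append(cur)
--     return out
--
--
-- def fix_outliers(truth_data_steps, prediction_data_steps):
--     prv = _last_change(truth_data_steps)
--     nxt = _last_change(truth_data_steps[::-1])[::-1]
--     for i in range(len(truth_data_steps)):
--         if truth_data_steps[i] == 0 and prediction_data_steps[i] != 0 and \
--                 (prediction_data_steps[i] == prv[i] or prediction_data_steps[i] == nxt[i]):
--             prediction_data_steps[i] = 0
--     return truth_data_steps, prediction_data_steps
-- ===== Notes on version B (the rewrite author's own statement) =====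
-- stated objective: alternative
-- what changed: A's running steps_order list plus a k counter with three-way boundary branching is replaced by two symmetric scans (previous/next run value per index, the next-scan obtained by running the same helper on the reversed list) followed by one pointwise pass over the predictions.
import Mathlib
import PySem

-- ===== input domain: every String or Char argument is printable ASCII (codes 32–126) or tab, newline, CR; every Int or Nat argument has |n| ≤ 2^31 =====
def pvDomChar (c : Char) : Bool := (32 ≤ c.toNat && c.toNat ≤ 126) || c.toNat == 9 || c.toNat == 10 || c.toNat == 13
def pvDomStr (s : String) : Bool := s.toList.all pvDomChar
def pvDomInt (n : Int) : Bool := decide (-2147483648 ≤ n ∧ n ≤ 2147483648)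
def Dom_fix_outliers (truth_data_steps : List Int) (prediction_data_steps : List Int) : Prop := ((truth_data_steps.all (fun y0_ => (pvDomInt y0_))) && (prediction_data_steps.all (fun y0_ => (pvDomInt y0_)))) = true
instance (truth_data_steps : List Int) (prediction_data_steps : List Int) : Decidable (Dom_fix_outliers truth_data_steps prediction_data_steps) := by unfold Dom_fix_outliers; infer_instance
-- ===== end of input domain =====

-- B replaces A's steps_order/k bookkeeping by two symmetric run-boundary scans (previous/next run
-- value per index) followed by one pointwise pass; same return value, and B performs the same
-- in-place mutation of prediction_data_steps as A.

-- ===== PORT A =====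
def fix_outliers (truth_data_steps : List Int) (prediction_data_steps : List Int) : List Int × List Int :=
  -- steps_order = [truth[0]]; for step_index in range(len(truth)): append on change
  let so : List Int := (PySem.List.pyRange 0 truth_data_steps.length 1).foldl
    (fun acc si =>
      if si ≠ 0 ∧ PySem.List.pyGetD truth_data_steps si 0 ≠ PySem.List.pyGetD truth_data_steps (si - 1) 0
      then acc ++ [PySem.List.pyGetD truth_data_steps si 0] else acc)
    [PySem.List.pyGetD truth_data_steps 0 0]
  -- k = 0; for i in range(len(truth)): …
  let st : Int × List Int := (PySem.List.pyRange 0 truth_data_steps.length 1).foldl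
    (fun (st : Int × List Int) i =>
      let k : Int :=
        if i ≠ 0 ∧ PySem.List.pyGetD truth_data_steps i 0 ≠ PySem.List.pyGetD truth_data_steps (i - 1) 0
        then st.1 + 1 else st.1
      let pr := st.2
      if PySem.List.pyGetD truth_data_steps i 0 = 0 then
        if PySem.List.pyGetD truth_data_steps i 0 ≠ PySem.List.pyGetD pr i 0 then
          let lv : List Int :=
            if k = 0 then [PySem.List.pyGetD so k 0, PySem.List.pyGetD so (k + 1) 0]
            else if k = (so.length : Int) - 1 then [PySem.List.pyGetD so (k - 1) 0, PySem.List.pyGetD so k 0]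
            else [PySem.List.pyGetD so (k - 1) 0, PySem.List.pyGetD so k 0, PySem.List.pyGetD so (k + 1) 0]
          if PySem.List.pyGetD pr i 0 ∈ lv then
            (k, PySem.List.pySetD pr i (PySem.List.pyGetD truth_data_steps i 0))
          else (k, pr)
        else (k, pr)
      else (k, pr))
    (0, prediction_data_steps)
  (truth_data_steps, st.2)

-- ===== PORT B =====
-- out[j] = value of the run immediately preceding j's run in seq, or None for the first run
def lastChange (seq : List Int) : List (Option Int) :=
  ((PySem.List.pyRange 0 seq.length 1).foldl
    (fun (st : List (Option Int) × Option Int) j =>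
      let cur : Option Int :=
        if j > 0 ∧ PySem.List.pyGetD seq (j - 1) 0 ≠ PySem.List.pyGetD seq j 0
        then some (PySem.List.pyGetD seq (j - 1) 0) else st.2
      (st.1 ++ [cur], cur))
    ([], none)).1

def fix_outliers_alt (truth_data_steps : List Int) (prediction_data_steps : List Int) : List Int × List Int :=
  let prv := lastChange truth_data_steps
  let nxt := (lastChange truth_data_steps.reverse).reverse
  let pr := (PySem.List.pyRange 0 truth_data_steps.length 1).foldl
    (fun pr i =>
      if PySem.List.pyGetD truth_data_steps i 0 = 0 ∧ PySem.List.pyGetD pr i 0 ≠ 0 ∧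
          (some (PySem.List.pyGetD pr i 0) = PySem.List.pyGetD prv i none ∨
           some (PySem.List.pyGetD pr i 0) = PySem.List.pyGetD nxt i none)
      then PySem.List.pySetD pr i 0 else pr)
    prediction_data_steps
  (truth_data_steps, pr)

-- ===== PRECONDITION & SPEC =====
-- Pre_ excludes exactly the inputs where the Python A raises: an empty truth list (IndexError on
-- truth[0]), an idle index beyond prediction's length (IndexError on prediction[i]), and an
-- all-idle truth with some nonzero prediction (IndexError on steps_order[k + 1]).
def Pre_fix_outliers (truth_data_steps : List Int) (prediction_data_steps : List Int) : Prop :=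
  truth_data_steps ≠ [] ∧
  (∀ i ∈ List.range truth_data_steps.length,
      truth_data_steps.getD i 0 = 0 → i < prediction_data_steps.length) ∧
  ¬ ((∀ i ∈ List.range truth_data_steps.length, truth_data_steps.getD i 0 = 0) ∧
     (∃ i ∈ List.range truth_data_steps.length, prediction_data_steps.getD i 0 ≠ 0))
instance (truth_data_steps : List Int) (prediction_data_steps : List Int) : Decidable (Pre_fix_outliers truth_data_steps prediction_data_steps) := by unfold Pre_fix_outliers; infer_instance

def pvWitness_fix_outliers : List Int × List Int := ([1, 0, 0, 2, 0, 1], [1, 2, 1, 2, 3, 1])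

def Spec_fix_outliers (truth_data_steps : List Int) (prediction_data_steps : List Int) (out : List Int × List Int) : Prop := out = fix_outliers_alt truth_data_steps prediction_data_steps
instance (truth_data_steps : List Int) (prediction_data_steps : List Int) (out : List Int × List Int) : Decidable (Spec_fix_outliers truth_data_steps prediction_data_steps out) := by unfold Spec_fix_outliers; infer_instance

-- ===== CLAIM (what is proved, stated in full; the proofs are below) =====
def Claim_equal_fix_outliers : Prop := ∀ (truth_data_steps : List Int) (prediction_data_steps : List Int), Dom_fix_outliers truth_data_steps prediction_data_steps → Pre_fix_outliers truth_data_steps prediction_data_steps → Spec_fix_outliers truth_data_steps prediction_data_steps (fix_outliers truth_data_steps prediction_data_steps)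

-- ===== LEMMAS AND PROOFS =====

-- number of run changes among indices 1..i of t (read through getD)
def chg (t : List Int) : Nat → Nat
  | 0 => 0
  | i + 1 => chg t i + (if t.getD (i + 1) 0 ≠ t.getD i 0 then 1 else 0)

-- steps_order after A has processed indices 0..m-1
def ords (t : List Int) : Nat → List Int
  | 0 => [t.getD 0 0]
  | m + 1 => ords t m ++ (if m ≠ 0 ∧ t.getD m 0 ≠ t.getD (m - 1) 0 then [t.getD m 0] else [])

-- value of the run immediately preceding i's run (B's forward scan, closed form)
def prvF (t : List Int) : Nat → Option Int
  | 0 => none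
  | i + 1 => if t.getD i 0 ≠ t.getD (i + 1) 0 then some (t.getD i 0) else prvF t i

-- value of the run immediately following i's run
def nxtF (t : List Int) (i : Nat) : Option Int :=
  if h : i + 1 < t.length then
    (if t.getD (i + 1) 0 ≠ t.getD i 0 then some (t.getD (i + 1) 0) else nxtF t (i + 1))
  else none
termination_by t.length - i

theorem chg_succ (t : List Int) (i : Nat) :
    chg t (i + 1) = chg t i + (if t.getD (i + 1) 0 ≠ t.getD i 0 then 1 else 0) := rfl

theorem chg_mono (t : List Int) {i j : Nat} (h : i ≤ j) : chg t i ≤ chg t j := by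
  induction j with
  | zero =>
    have : i = 0 := Nat.le_zero.mp h
    subst this
    exact le_rfl
  | succ j ih =>
    rcases Nat.lt_or_ge i (j + 1) with h' | h'
    · exact le_trans (ih (by omega)) (by rw [chg_succ]; exact Nat.le_add_right _ _)
    · have : i = j + 1 := by omega
      subst this
      exact le_rfl

theorem ords_prefix (t : List Int) (m k : Nat) : (ords t m) <+: ords t (m + k) := by
  induction k with
  | zero => simp
  | succ k ih =>
    refine ih.trans ?_
    show ords t (m + k) <+: ords t (m + k) ++ _
    exact List.prefix_append _ _

theorem getD_of_prefix {l l' : List Int} (h : l <+: l') {n : Nat} (hn : n < l.length) (d : Int) :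
    l'.getD n d = l.getD n d := by
  obtain ⟨u, rfl⟩ := h
  exact List.getD_append l u d n hn

theorem ords_spec (t : List Int) (i : Nat) :
    (ords t (i + 1)).getD (chg t i) 0 = t.getD i 0 ∧ (ords t (i + 1)).length = chg t i + 1 := by
  induction i with
  | zero => simp [ords, chg]
  | succ i ih =>
    have hords : ords t (i + 1 + 1) =
        ords t (i + 1) ++ (if i + 1 ≠ 0 ∧ t.getD (i + 1) 0 ≠ t.getD (i + 1 - 1) 0 then [t.getD (i + 1) 0] else []) := rfl
    by_cases hc : t.getD (i + 1) 0 ≠ t.getD i 0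
    · have h1 : chg t (i + 1) = chg t i + 1 := by rw [chg_succ, if_pos hc]
      rw [hords, if_pos ⟨by omega, by simpa using hc⟩, h1]
      constructor
      · rw [show chg t i + 1 = (ords t (i + 1)).length from (ih.2).symm,
          List.getD_eq_getElem?_getD, List.getElem?_append_right (by omega)]
        simp
      · simp [ih.2]
    · push_neg at hc
      have h1 : chg t (i + 1) = chg t i := by
        rw [chg_succ, if_neg (not_not_intro hc), Nat.add_zero]
      rw [hords, if_neg (fun h => h.2 hc), List.append_nil, h1, ih.1, hc, ih.2]
      exact ⟨rfl, rfl⟩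

theorem so_getD (t : List Int) {i : Nat} (hi : i < t.length) :
    (ords t t.length).getD (chg t i) 0 = t.getD i 0 := by
  have h := ords_spec t i
  have hp : ords t (i + 1) <+: ords t t.length := by
    have := ords_prefix t (i + 1) (t.length - (i + 1))
    rwa [Nat.add_sub_cancel' (by omega)] at this
  rw [getD_of_prefix hp (by omega) 0, h.1]

theorem so_length (t : List Int) (h : t ≠ []) :
    (ords t t.length).length = chg t (t.length - 1) + 1 := by
  have hn : t.length - 1 + 1 = t.length := by
    have : 0 < t.length := List.length_pos_iff.mpr h
    omega
  rw [← hn]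
  exact (ords_spec t (t.length - 1)).2

theorem prvF_spec (t : List Int) {i : Nat} (hi : i < t.length) :
    prvF t i = if chg t i = 0 then none else some ((ords t t.length).getD (chg t i - 1) 0) := by
  induction i with
  | zero => simp [prvF, chg]
  | succ i ih =>
    by_cases hc : t.getD i 0 ≠ t.getD (i + 1) 0
    · have h1 : chg t (i + 1) = chg t i + 1 := by
        rw [chg_succ, if_pos (fun h => hc h.symm)]
      rw [prvF, if_pos hc, h1, if_neg (by omega), Nat.add_sub_cancel,
        so_getD t (show i < t.length by omega)]
    · push_neg at hc
      have h1 : chg t (i + 1) = chg t i := by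
        rw [chg_succ, if_neg (not_not_intro hc.symm), Nat.add_zero]
      rw [prvF, if_neg (not_not_intro hc), h1, ih (by omega)]

theorem nxtF_spec (t : List Int) : ∀ d i, i < t.length → t.length - 1 - i = d →
    nxtF t i = if chg t i = chg t (t.length - 1) then none
               else some ((ords t t.length).getD (chg t i + 1) 0) := by
  intro d
  induction d with
  | zero =>
    intro i hi hd
    have : i = t.length - 1 := by omega
    subst this
    rw [nxtF, dif_neg (by omega), if_pos rfl]
  | succ d ih =>
    intro i hi hd
    have hi1 : i + 1 < t.length := by omega
    by_cases hc : t.getD (i + 1) 0 ≠ t.getD i 0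
    · have h1 : chg t (i + 1) = chg t i + 1 := by rw [chg_succ, if_pos hc]
      have hle : chg t (i + 1) ≤ chg t (t.length - 1) := chg_mono t (by omega)
      rw [nxtF, dif_pos hi1, if_pos hc, if_neg (by omega)]
      have := so_getD t hi1
      rw [← h1, this]
    · push_neg at hc
      have h1 : chg t (i + 1) = chg t i := by
        rw [chg_succ, if_neg (not_not_intro hc), Nat.add_zero]
      rw [nxtF, dif_pos hi1, if_neg (not_not_intro hc), ih (i + 1) hi1 (by omega), h1]

-- B's forward scan computes prvF pointwise
theorem lastChange_eq (s : List Int) : lastChange s = (List.range s.length).map (prvF s) := by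
  unfold lastChange
  rw [PySem.List.pyRange_zero_natCast, List.foldl_map]
  suffices h : ∀ m, m ≤ s.length →
      (List.range m).foldl
        (fun (st : List (Option Int) × Option Int) (j : Nat) =>
          let cur : Option Int :=
            if (j : Int) > 0 ∧ PySem.List.pyGetD s ((j : Int) - 1) 0 ≠ PySem.List.pyGetD s (j : Int) 0
            then some (PySem.List.pyGetD s ((j : Int) - 1) 0) else st.2
          (st.1 ++ [cur], cur))
        ([], none) = ((List.range m).map (prvF s), prvF s (m - 1)) by
    rw [h s.length le_rfl]
  intro m hm
  induction m with
  | zero => simp [prvF]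
  | succ m ih =>
    rw [List.range_succ, List.foldl_append, ih (by omega)]
    simp only [List.foldl_cons, List.foldl_nil]
    have hcur : (if (m : Int) > 0 ∧ PySem.List.pyGetD s ((m : Int) - 1) 0 ≠ PySem.List.pyGetD s (m : Int) 0
        then some (PySem.List.pyGetD s ((m : Int) - 1) 0) else prvF s (m - 1)) = prvF s m := by
      cases m with
      | zero => simp [prvF]
      | succ m' =>
        have h1 : ((m' + 1 : Nat) : Int) - 1 = ((m' : Nat) : Int) := by push_cast; ring
        rw [h1, PySem.List.pyGetD_natCast, PySem.List.pyGetD_natCast]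
        by_cases hc : s.getD m' 0 ≠ s.getD (m' + 1) 0
        · rw [if_pos ⟨by exact_mod_cast Nat.succ_pos m', hc⟩, prvF, if_pos hc]
        · push_neg at hc
          rw [if_neg (fun h => h.2 hc), prvF, if_neg (not_not_intro hc)]
          rfl
    rw [hcur]
    simp [List.range_succ]

theorem lastChange_getD (s : List Int) {i : Nat} (hi : i < s.length) :
    (lastChange s).getD i none = prvF s i := by
  rw [lastChange_eq, List.getD_eq_getElem?_getD, List.getElem?_map, List.getElem?_range hi]
  rfl

theorem getD_reverse (t : List Int) {j : Nat} (hj : j < t.length) (d : Int) :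
    t.reverse.getD j d = t.getD (t.length - 1 - j) d := by
  rw [List.getD_eq_getElem?_getD, List.getD_eq_getElem?_getD,
    List.getElem?_eq_getElem (by simpa using hj), List.getElem?_eq_getElem (by omega),
    List.getElem_reverse]

theorem prvF_reverse (t : List Int) : ∀ d i, i < t.length → t.length - 1 - i = d →
    prvF t.reverse (t.length - 1 - i) = nxtF t i := by
  intro d
  induction d with
  | zero =>
    intro i hi hd
    rw [hd, nxtF, dif_neg (by omega)]
    rfl
  | succ d ih =>
    intro i hi hd
    have hi1 : i + 1 < t.length := by omega
    have hstep : t.length - 1 - i = (t.length - 1 - (i + 1)) + 1 := by omega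
    rw [hstep, prvF]
    have e1 : t.reverse.getD (t.length - 1 - (i + 1)) 0 = t.getD (i + 1) 0 := by
      rw [getD_reverse t (by omega) 0]
      congr 1
      omega
    have e2 : t.reverse.getD (t.length - 1 - (i + 1) + 1) 0 = t.getD i 0 := by
      rw [getD_reverse t (by omega) 0]
      congr 1
      omega
    rw [e1, e2, ih (i + 1) hi1 (by omega)]
    conv_rhs => rw [nxtF]
    rw [dif_pos hi1]

theorem nxt_getD (t : List Int) {i : Nat} (hi : i < t.length) :
    ((lastChange t.reverse).reverse).getD i none = nxtF t i := by
  have hlen : (lastChange t.reverse).length = t.length := by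
    rw [lastChange_eq]
    simp
  rw [List.getD_eq_getElem?_getD,
    List.getElem?_eq_getElem (by simp [hlen, hi]), List.getElem_reverse]
  have : (lastChange t.reverse)[(lastChange t.reverse).length - 1 - i] =
      (lastChange t.reverse).getD ((lastChange t.reverse).length - 1 - i) none := by
    rw [List.getD_eq_getElem?_getD, List.getElem?_eq_getElem (by omega)]
    rfl
  rw [this, hlen, lastChange_getD t.reverse (by simp; omega),
    prvF_reverse t (t.length - 1 - i) i hi rfl]
  rfl

-- pointwise equivalence of the two membership tests, for an idle index with nonzero prediction
theorem cond_equiv (t : List Int) {i : Nat} (hi : i < t.length) (ht : t.getD i 0 = 0)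
    {v : Int} (hv : v ≠ 0) :
    (v ∈ (if ((chg t i : Nat) : Int) = 0 then
            [PySem.List.pyGetD (ords t t.length) ((chg t i : Nat) : Int) 0,
             PySem.List.pyGetD (ords t t.length) (((chg t i : Nat) : Int) + 1) 0]
          else if ((chg t i : Nat) : Int) = ((ords t t.length).length : Int) - 1 then
            [PySem.List.pyGetD (ords t t.length) (((chg t i : Nat) : Int) - 1) 0,
             PySem.List.pyGetD (ords t t.length) ((chg t i : Nat) : Int) 0]
          else
            [PySem.List.pyGetD (ords t t.length) (((chg t i : Nat) : Int) - 1) 0,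
             PySem.List.pyGetD (ords t t.length) ((chg t i : Nat) : Int) 0,
             PySem.List.pyGetD (ords t t.length) (((chg t i : Nat) : Int) + 1) 0])) ↔
    (some v = prvF t i ∨ some v = nxtF t i) := by
  have htne : t ≠ [] := by intro h; subst h; simp at hi
  have hK := so_length t htne
  have hself : (ords t t.length).getD (chg t i) 0 = t.getD i 0 := so_getD t hi
  have hmono : chg t i ≤ chg t (t.length - 1) := chg_mono t (by omega)
  have ep : (((chg t i : Nat) : Int) + 1) = ((chg t i + 1 : Nat) : Int) := by push_cast; ring
  rw [prvF_spec t hi, nxtF_spec t (t.length - 1 - i) i hi rfl]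
  by_cases h0 : chg t i = 0
  · rw [if_pos (by exact_mod_cast h0), if_pos h0, ep,
      PySem.List.pyGetD_natCast, PySem.List.pyGetD_natCast, hself, ht]
    by_cases hKz : chg t (t.length - 1) = 0
    · rw [if_pos (by omega), List.getD_eq_default _ _ (by omega)]
      simp [hv]
    · rw [if_neg (by omega), h0]
      simp [hv]
  · have em : (((chg t i : Nat) : Int) - 1) = ((chg t i - 1 : Nat) : Int) := by push_cast; omega
    rw [if_neg (by exact_mod_cast h0), if_neg h0, em, ep,
      PySem.List.pyGetD_natCast, PySem.List.pyGetD_natCast, PySem.List.pyGetD_natCast, hself, ht]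
    by_cases hKe : chg t i = chg t (t.length - 1)
    · rw [if_pos (by push_cast; omega), if_pos hKe]
      simp [hv]
    · rw [if_neg (by push_cast; omega), if_neg hKe]
      simp [hv]

-- A's first loop computes ords
theorem soA_eq (t : List Int) :
    (PySem.List.pyRange 0 t.length 1).foldl
      (fun acc si =>
        if si ≠ 0 ∧ PySem.List.pyGetD t si 0 ≠ PySem.List.pyGetD t (si - 1) 0
        then acc ++ [PySem.List.pyGetD t si 0] else acc)
      [PySem.List.pyGetD t 0 0] = ords t t.length := by
  rw [PySem.List.pyRange_zero_natCast, List.foldl_map]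
  suffices h : ∀ m, (List.range m).foldl
      (fun acc (j : Nat) =>
        if (j : Int) ≠ 0 ∧ PySem.List.pyGetD t (j : Int) 0 ≠ PySem.List.pyGetD t ((j : Int) - 1) 0
        then acc ++ [PySem.List.pyGetD t (j : Int) 0] else acc)
      [PySem.List.pyGetD t 0 0] = ords t m by
    exact h t.length
  intro m
  induction m with
  | zero =>
    simp only [List.range_zero, List.foldl_nil, ords]
    rw [show (0 : Int) = ((0 : Nat) : Int) from rfl, PySem.List.pyGetD_natCast]
  | succ m ih =>
    rw [List.range_succ, List.foldl_append, ih]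
    simp only [List.foldl_cons, List.foldl_nil]
    cases m with
    | zero =>
      rw [if_neg (by simp)]
      rfl
    | succ m' =>
      have h1 : ((m' + 1 : Nat) : Int) - 1 = ((m' : Nat) : Int) := by push_cast; ring
      rw [h1, PySem.List.pyGetD_natCast, PySem.List.pyGetD_natCast]
      by_cases hc : t.getD (m' + 1) 0 ≠ t.getD m' 0
      · rw [if_pos ⟨Nat.cast_ne_zero.mpr (Nat.succ_ne_zero m'), hc⟩]
        conv_rhs => rw [ords]
        rw [if_pos ⟨Nat.succ_ne_zero m', hc⟩]
      · push_neg at hc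
        rw [if_neg (fun h => h.2 hc)]
        conv_rhs => rw [ords]
        rw [if_neg (fun h => h.2 hc), List.append_nil]

-- main loop correspondence
theorem main_loop_eq (t p : List Int) :
    ∀ m, m ≤ t.length →
    (List.range m).foldl
      (fun (st : Int × List Int) (j : Nat) =>
        let k : Int :=
          if (j : Int) ≠ 0 ∧ PySem.List.pyGetD t (j : Int) 0 ≠ PySem.List.pyGetD t ((j : Int) - 1) 0
          then st.1 + 1 else st.1
        let pr := st.2
        if PySem.List.pyGetD t (j : Int) 0 = 0 then
          if PySem.List.pyGetD t (j : Int) 0 ≠ PySem.List.pyGetD pr (j : Int) 0 then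
            let lv : List Int :=
              if k = 0 then [PySem.List.pyGetD (ords t t.length) k 0, PySem.List.pyGetD (ords t t.length) (k + 1) 0]
              else if k = ((ords t t.length).length : Int) - 1 then
                [PySem.List.pyGetD (ords t t.length) (k - 1) 0, PySem.List.pyGetD (ords t t.length) k 0]
              else [PySem.List.pyGetD (ords t t.length) (k - 1) 0, PySem.List.pyGetD (ords t t.length) k 0,
                    PySem.List.pyGetD (ords t t.length) (k + 1) 0]
            if PySem.List.pyGetD pr (j : Int) 0 ∈ lv then
              (k, PySem.List.pySetD pr (j : Int) (PySem.List.pyGetD t (j : Int) 0))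
            else (k, pr)
          else (k, pr)
        else (k, pr))
      (0, p)
    = ((chg t (m - 1) : Int),
       (List.range m).foldl
        (fun pr (j : Nat) =>
          if PySem.List.pyGetD t (j : Int) 0 = 0 ∧ PySem.List.pyGetD pr (j : Int) 0 ≠ 0 ∧
              (some (PySem.List.pyGetD pr (j : Int) 0) = PySem.List.pyGetD (lastChange t) (j : Int) none ∨
               some (PySem.List.pyGetD pr (j : Int) 0) = PySem.List.pyGetD ((lastChange t.reverse).reverse) (j : Int) none)
          then PySem.List.pySetD pr (j : Int) 0 else pr)
        p) := by
  intro m hm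
  induction m with
  | zero => simp [chg]
  | succ m ih =>
    rw [List.range_succ, List.foldl_append, List.foldl_append, ih (by omega)]
    simp only [List.foldl_cons, List.foldl_nil]
    have hm' : m < t.length := by omega
    set q : List Int := (List.range m).foldl
        (fun pr (j : Nat) =>
          if PySem.List.pyGetD t (j : Int) 0 = 0 ∧ PySem.List.pyGetD pr (j : Int) 0 ≠ 0 ∧
              (some (PySem.List.pyGetD pr (j : Int) 0) = PySem.List.pyGetD (lastChange t) (j : Int) none ∨
               some (PySem.List.pyGetD pr (j : Int) 0) = PySem.List.pyGetD ((lastChange t.reverse).reverse) (j : Int) none)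
          then PySem.List.pySetD pr (j : Int) 0 else pr)
        p with hq
    -- the incremented k equals chg t m
    have hk : (if (m : Int) ≠ 0 ∧ PySem.List.pyGetD t (m : Int) 0 ≠ PySem.List.pyGetD t ((m : Int) - 1) 0
        then (chg t (m - 1) : Int) + 1 else (chg t (m - 1) : Int)) = (chg t m : Int) := by
      cases m with
      | zero => simp
      | succ m' =>
        have h1 : ((m' + 1 : Nat) : Int) - 1 = ((m' : Nat) : Int) := by push_cast; ring
        rw [h1, PySem.List.pyGetD_natCast, PySem.List.pyGetD_natCast]
        by_cases hc : t.getD (m' + 1) 0 ≠ t.getD m' 0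
        · rw [if_pos ⟨Nat.cast_ne_zero.mpr (Nat.succ_ne_zero m'), hc⟩,
            show chg t (m' + 1) = chg t m' + 1 from by rw [chg_succ, if_pos hc]]
          push_cast
          ring
        · push_neg at hc
          rw [if_neg (fun h => h.2 hc),
            show chg t (m' + 1) = chg t m' from by
              rw [chg_succ, if_neg (not_not_intro hc), Nat.add_zero]]
          rfl
    simp only [hk]
    -- now both sides step on index m
    by_cases ht0 : PySem.List.pyGetD t (m : Int) 0 = 0
    · rw [if_pos ht0]
      have ht0' : t.getD m 0 = 0 := by rwa [PySem.List.pyGetD_natCast] at ht0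
      by_cases hp0 : PySem.List.pyGetD t (m : Int) 0 ≠ PySem.List.pyGetD q (m : Int) 0
      · rw [if_pos hp0]
        have hv : PySem.List.pyGetD q (m : Int) 0 ≠ 0 := by
          intro h
          apply hp0
          rw [ht0, h]
        have hlv := cond_equiv t hm' ht0' (v := PySem.List.pyGetD q (m : Int) 0) hv
        by_cases hmem : PySem.List.pyGetD q (m : Int) 0 ∈
            (if ((chg t m : Nat) : Int) = 0 then
              [PySem.List.pyGetD (ords t t.length) ((chg t m : Nat) : Int) 0,
               PySem.List.pyGetD (ords t t.length) (((chg t m : Nat) : Int) + 1) 0]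
            else if ((chg t m : Nat) : Int) = ((ords t t.length).length : Int) - 1 then
              [PySem.List.pyGetD (ords t t.length) (((chg t m : Nat) : Int) - 1) 0,
               PySem.List.pyGetD (ords t t.length) ((chg t m : Nat) : Int) 0]
            else
              [PySem.List.pyGetD (ords t t.length) (((chg t m : Nat) : Int) - 1) 0,
               PySem.List.pyGetD (ords t t.length) ((chg t m : Nat) : Int) 0,
               PySem.List.pyGetD (ords t t.length) (((chg t m : Nat) : Int) + 1) 0])
        · rw [if_pos hmem]
          have hcondB : PySem.List.pyGetD t (m : Int) 0 = 0 ∧ PySem.List.pyGetD q (m : Int) 0 ≠ 0 ∧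
              (some (PySem.List.pyGetD q (m : Int) 0) = PySem.List.pyGetD (lastChange t) (m : Int) none ∨
               some (PySem.List.pyGetD q (m : Int) 0) = PySem.List.pyGetD ((lastChange t.reverse).reverse) (m : Int) none) := by
            refine ⟨ht0, hv, ?_⟩
            rw [PySem.List.pyGetD_natCast (lastChange t) m none,
              PySem.List.pyGetD_natCast ((lastChange t.reverse).reverse) m none,
              lastChange_getD t hm', nxt_getD t hm']
            exact hlv.mp hmem
          rw [if_pos hcondB, ht0]
          simp [Nat.add_sub_cancel]
        · rw [if_neg hmem]
          have hcondB : ¬ (PySem.List.pyGetD t (m : Int) 0 = 0 ∧ PySem.List.pyGetD q (m : Int) 0 ≠ 0 ∧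
              (some (PySem.List.pyGetD q (m : Int) 0) = PySem.List.pyGetD (lastChange t) (m : Int) none ∨
               some (PySem.List.pyGetD q (m : Int) 0) = PySem.List.pyGetD ((lastChange t.reverse).reverse) (m : Int) none)) := by
            intro hc
            apply hmem
            apply hlv.mpr
            have h3 := hc.2.2
            rwa [PySem.List.pyGetD_natCast (lastChange t) m none,
              PySem.List.pyGetD_natCast ((lastChange t.reverse).reverse) m none,
              lastChange_getD t hm', nxt_getD t hm'] at h3
          rw [if_neg hcondB]
          simp [Nat.add_sub_cancel]
      · rw [if_neg hp0]
        push_neg at hp0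
        have hcondB : ¬ (PySem.List.pyGetD t (m : Int) 0 = 0 ∧ PySem.List.pyGetD q (m : Int) 0 ≠ 0 ∧
            (some (PySem.List.pyGetD q (m : Int) 0) = PySem.List.pyGetD (lastChange t) (m : Int) none ∨
             some (PySem.List.pyGetD q (m : Int) 0) = PySem.List.pyGetD ((lastChange t.reverse).reverse) (m : Int) none)) := by
          intro hc
          exact hc.2.1 (by rw [← hp0, ht0])
        rw [if_neg hcondB]
        simp [Nat.add_sub_cancel]
    · rw [if_neg ht0]
      have hcondB : ¬ (PySem.List.pyGetD t (m : Int) 0 = 0 ∧ PySem.List.pyGetD q (m : Int) 0 ≠ 0 ∧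
          (some (PySem.List.pyGetD q (m : Int) 0) = PySem.List.pyGetD (lastChange t) (m : Int) none ∨
           some (PySem.List.pyGetD q (m : Int) 0) = PySem.List.pyGetD ((lastChange t.reverse).reverse) (m : Int) none)) :=
        fun hc => ht0 hc.1
      rw [if_neg hcondB]
      simp [Nat.add_sub_cancel]

-- membership-hit branch above sets pyGetD t m = 0, matching B's literal 0; finish assembling
theorem ports_agree (t p : List Int) : fix_outliers t p = fix_outliers_alt t p := by
  unfold fix_outliers fix_outliers_alt
  simp only
  rw [soA_eq]
  rw [PySem.List.pyRange_zero_natCast, List.foldl_map, List.foldl_map]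
  exact congrArg (Prod.mk t) (congrArg Prod.snd (main_loop_eq t p t.length le_rfl))

-- ===== VERDICT (by name: the statement is the Claim_ definition above) =====
theorem fix_outliers_spec : Claim_equal_fix_outliers := by
  intro t p _ _
  unfold Spec_fix_outliers
  exact ports_agree t p
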